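-- pv_equiv track=rewrite | github.com/nicolapoggialini/neural_network_from_scratch | methods.py | pred_dict
-- ===== SOURCE A (Python) =====
-- def pred_dict(pred, y):
--
--     d = {}
--     for i in range(len(y)):
--         if y[i] in d:
--             d[y[i]][0] = d[y[i]][0] + 1 # first value: number of cases
--             if y[i] == pred[i]:
--                 d[y[i]][1] = d[y[i]][1] + 1 # second value: number of true predictions
--         elif y[i] == pred[i]:
--             d[y[i]] = [1,1]
--         else:
--             d[y[i]] = [1,0]
--     return d
-- ===== SOURCE B (Python) =====
-- def pred_dict(pred, y):
--     # per-label rescans: collect distinct labels in first-appearance order, then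
--     # for each label count its cases and its correct predictions by scanning anew
--     # (O(n*k) nested scans instead of A's single accumulating pass)
--     seen = []
--     for label in y:
--         if label not in seen:
--             seen.append(label)
--     return {label: [y.count(label),
--                     sum(1 for yv, pv in zip(y, pred) if yv == label and yv == pv)]
--             for label in seen}
-- ===== Notes on version B (the rewrite author's own statement) =====
-- stated objective: alternative
-- what changed: A's single pass that incrementally mutates per-label [cases,correct] lists in a dict is replaced by first collecting the distinct labels in order of first appearance and then, for each label, recounting cases with y.count and correct predictions with a fresh scan of zip(y,pred): per-label nested rescans (O(n*k)) instead of one accumulating pass (O(n)).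
-- outside the precondition, e.g. on pred_dict([], [5]): A raises IndexError, B returns {5: [1, 0]}
import Mathlib
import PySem

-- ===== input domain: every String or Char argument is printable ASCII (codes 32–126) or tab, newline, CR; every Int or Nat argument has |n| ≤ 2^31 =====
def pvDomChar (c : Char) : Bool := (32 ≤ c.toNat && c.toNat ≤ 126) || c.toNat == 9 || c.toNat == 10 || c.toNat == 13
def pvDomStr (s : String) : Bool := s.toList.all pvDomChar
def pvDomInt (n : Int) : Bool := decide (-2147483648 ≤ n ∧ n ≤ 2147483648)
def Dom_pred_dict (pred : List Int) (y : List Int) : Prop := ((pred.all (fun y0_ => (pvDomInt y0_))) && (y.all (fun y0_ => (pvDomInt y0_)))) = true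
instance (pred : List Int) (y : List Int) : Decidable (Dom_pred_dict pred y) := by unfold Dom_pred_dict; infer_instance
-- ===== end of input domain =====

-- B replaces A's single accumulating pass by per-label rescans: distinct labels in
-- first-appearance order, then for each label a fresh count of cases and of correct
-- predictions; alternative decomposition (O(n*k) rescans vs A's O(n) single pass).


-- ===== PORT A =====
-- one loop step of A's body (yi = y[i], pi = pred[i]); the list reads/writes
-- d[y[i]][0], d[y[i]][1] are exact here because every stored value has length 2
def predStepA (d : PySem.Dict Int (List Int)) (yi pi : Int) : PySem.Dict Int (List Int) :=
  if d.contains yi then                                      -- if y[i] in d: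
    let v := d.getD yi []
    let v := v.set 0 (v.getD 0 0 + 1)                        --   d[y[i]][0] = d[y[i]][0] + 1
    let v := if yi = pi then v.set 1 (v.getD 1 0 + 1) else v --   if y[i] == pred[i]: d[y[i]][1] = d[y[i]][1] + 1
    d.insert yi v
  else if yi = pi then d.insert yi [1, 1]                    -- elif y[i] == pred[i]: d[y[i]] = [1,1]
  else d.insert yi [1, 0]                                    -- else: d[y[i]] = [1,0]

-- for i in range(len(y)): ...; y.getD i 0 / pred.getD i 0 are exact for the indices
-- range(len(y)) yields (always in range for y; in range for pred under Pre_)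
def pred_dict (pred : List Int) (y : List Int) : List (Int × List Int) :=
  ((List.range y.length).foldl
    (fun d i => predStepA d (y.getD i 0) (pred.getD i 0)) PySem.Dict.empty).items

-- ===== PORT B =====
-- seen: distinct labels of y in first-appearance order ('if label not in seen: seen.append')
-- then for each label: y.count(label) and sum(1 for yv,pv in zip(y,pred) if yv==label and yv==pv)
def pred_dict_alt (pred : List Int) (y : List Int) : List (Int × List Int) :=
  let seen := y.foldl (fun (s : List Int) label => if label ∈ s then s else s ++ [label]) []
  seen.map (fun label =>
    (label, [(y.count label : Int),
             (y.zip pred).foldl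
               (fun (n : Int) p => if p.1 = label ∧ p.1 = p.2 then n + 1 else n) 0]))

-- ===== PRECONDITION & SPEC =====
-- Pre_ excludes exactly the inputs with len(y) > len(pred), on which A raises IndexError at pred[i]
def Pre_pred_dict (pred : List Int) (y : List Int) : Prop := y.length ≤ pred.length
instance (pred : List Int) (y : List Int) : Decidable (Pre_pred_dict pred y) := by unfold Pre_pred_dict; infer_instance
def pvWitness_pred_dict : List Int × List Int := ([1, 2, 1], [1, 1, 1])

def Spec_pred_dict (pred : List Int) (y : List Int) (out : List (Int × List Int)) : Prop := out = pred_dict_alt pred y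
instance (pred : List Int) (y : List Int) (out : List (Int × List Int)) : Decidable (Spec_pred_dict pred y out) := by unfold Spec_pred_dict; infer_instance

-- ===== CLAIM (what is proved, stated in full; the proofs are below) =====
def Claim_equal_pred_dict : Prop := ∀ (pred : List Int) (y : List Int), Dom_pred_dict pred y → Pre_pred_dict pred y → Spec_pred_dict pred y (pred_dict pred y)

-- ===== LEMMAS AND PROOFS =====

-- labels of the correctly predicted pairs
def matchedLabels (L : List (Int × Int)) : List Int := (L.filter (fun p => p.1 == p.2)).map Prod.fst

-- the value A's step stores at key yi (for the keys-of-the-fold lemma)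
def predValA (d : PySem.Dict Int (List Int)) (yi pi : Int) : List Int :=
  if d.contains yi then
    let v := d.getD yi []
    let v := v.set 0 (v.getD 0 0 + 1)
    if yi = pi then v.set 1 (v.getD 1 0 + 1) else v
  else if yi = pi then [1, 1]
  else [1, 0]

theorem predStepA_insert (d : PySem.Dict Int (List Int)) (a b : Int) :
    predStepA d a b = d.insert a (predValA d a b) := by
  unfold predStepA predValA
  split_ifs <;> rfl

-- indexed fold of A = fold over the zipped list
theorem foldA_index_zip {α : Type} (g : α → Int → Int → α) :
    ∀ (y pred : List Int) (d : α), y.length ≤ pred.length →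
    (List.range y.length).foldl (fun d i => g d (y.getD i 0) (pred.getD i 0)) d
      = (y.zip pred).foldl (fun d p => g d p.1 p.2) d := by
  intro y
  induction y with
  | nil => intro pred d h; simp
  | cons a t ih =>
    intro pred d h
    match pred with
    | [] => simp at h
    | b :: pt =>
      simp only [List.length_cons, List.range_succ_eq_map, List.foldl_cons, List.foldl_map,
        List.zip_cons_cons, List.getD_cons_zero, List.getD_cons_succ]
      exact ih pt (g d a b) (by simpa using h)

theorem matchedLabels_cons (p : Int × Int) (t : List (Int × Int)) :
    matchedLabels (p :: t) = if p.1 = p.2 then p.1 :: matchedLabels t else matchedLabels t := by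
  simp only [matchedLabels, List.filter_cons, beq_iff_eq]
  split_ifs with h <;> simp

-- one step is an insert of a length-2 value extending the old counts
theorem predStepA_eq (d : PySem.Dict Int (List Int)) (a b : Int)
    (hlen : ∀ j v, d.get? j = some v → ∃ c t : Int, v = [c, t]) :
    predStepA d a b =
      d.insert a [(d.getD a []).getD 0 0 + 1,
                  (d.getD a []).getD 1 0 + (if a = b then 1 else 0)] := by
  by_cases hc : d.contains a = true
  · have hs : (d.get? a).isSome = true := by rw [← PySem.Dict.contains_eq_isSome_get?]; exact hc
    obtain ⟨v, hv⟩ := Option.isSome_iff_exists.mp hs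
    obtain ⟨c, t, rfl⟩ := hlen a v hv
    have hg : d.getD a [] = [c, t] := PySem.Dict.getD_of_get?_eq_some d [] hv
    by_cases hab : a = b
    · subst hab; simp [predStepA, hc, hg]
    · simp [predStepA, hc, hg, hab]
  · have hg : d.getD a [] = [] := PySem.Dict.getD_of_not_contains d [] (by simpa using hc)
    by_cases hab : a = b
    · subst hab; simp [predStepA, hc, hg]
    · simp [predStepA, hc, hg, hab]

theorem A_loop_get? (L : List (Int × Int)) :
    ∀ (d : PySem.Dict Int (List Int)),
    (∀ j v, d.get? j = some v → ∃ c t : Int, v = [c, t]) →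
    ∀ k : Int,
    (L.foldl (fun d p => predStepA d p.1 p.2) d).get? k =
      match d.get? k with
      | some v => some [v.getD 0 0 + ((L.map Prod.fst).count k : Int),
                        v.getD 1 0 + ((matchedLabels L).count k : Int)]
      | none => if k ∈ L.map Prod.fst
                then some [((L.map Prod.fst).count k : Int), ((matchedLabels L).count k : Int)]
                else none := by
  induction L with
  | nil =>
    intro d hlen k
    simp only [List.foldl_nil, List.map_nil, List.count_nil, List.not_mem_nil, if_false,
      matchedLabels]
    cases h : d.get? k with
    | none => simp
    | some v =>
      obtain ⟨c, t, rfl⟩ := hlen k v h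
      simp
  | cons p t ih =>
    intro d hlen k
    obtain ⟨a, b⟩ := p
    simp only [List.foldl_cons]
    rw [predStepA_eq d a b hlen]
    have hlen' : ∀ j v, (d.insert a ([(d.getD a []).getD 0 0 + 1,
        (d.getD a []).getD 1 0 + (if a = b then 1 else 0)])).get? j = some v → ∃ c t : Int, v = [c, t] := by
      intro j v hj
      rw [PySem.Dict.get?_insert] at hj
      by_cases hja : j = a
      · rw [if_pos hja] at hj; exact ⟨_, _, (Option.some_injective _ hj).symm⟩
      · rw [if_neg hja] at hj; exact hlen j v hj
    rw [ih _ hlen' k]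
    rw [matchedLabels_cons]
    simp only [List.map_cons, List.count_cons, List.mem_cons]
    by_cases hka : k = a
    · subst hka
      rw [PySem.Dict.get?_insert_self]
      cases h : d.get? k with
      | none =>
        have hnc : d.contains k = false := by
          rw [PySem.Dict.contains_eq_isSome_get?, h]; rfl
        simp only [PySem.Dict.getD_of_not_contains d [] hnc]
        by_cases hab : k = b
        · simp [hab]
          constructor <;> ring
        · simp [hab]
          ring
      | some v =>
        obtain ⟨c, tt, rfl⟩ := hlen k _ h
        simp only [PySem.Dict.getD_of_get?_eq_some d [] h]
        by_cases hab : k = b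
        · simp [hab]
          constructor <;> ring
        · simp [hab]
          ring
    · rw [PySem.Dict.get?_insert_of_ne _ _ hka]
      have hak : (a == k) = false := by simp [Ne.symm hka]
      have hm : List.count k (if a = b then a :: matchedLabels t else matchedLabels t)
          = List.count k (matchedLabels t) := by
        split
        · simp [List.count_cons, hak]
        · rfl
      have ho : (k = a ∨ k ∈ List.map Prod.fst t) ↔ k ∈ List.map Prod.fst t := or_iff_right hka
      cases h : d.get? k with
      | none =>
        simp only [hm, hak]
        simp only [Bool.false_eq_true, if_false, add_zero]
        rw [if_congr ho rfl rfl]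
      | some v => simp [hm, hak]

-- B's correct-prediction fold computes the count of k among the matched labels
theorem B_corr_fold (k : Int) (L : List (Int × Int)) :
    ∀ n : Int,
    L.foldl (fun (n : Int) p => if p.1 = k ∧ p.1 = p.2 then n + 1 else n) n
      = n + ((matchedLabels L).count k : Int) := by
  induction L with
  | nil => intro n; simp [matchedLabels]
  | cons p t ih =>
    intro n
    simp only [List.foldl_cons, matchedLabels_cons]
    by_cases hm : p.1 = p.2
    · by_cases hk : p.1 = k
      · rw [if_pos ⟨hk, hm⟩, if_pos hm, ih, hk, List.count_cons_self]; push_cast; ring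
      · rw [if_neg (by tauto), if_pos hm, ih]
        simp [List.count_cons, hk]
    · rw [if_neg (by tauto), if_neg hm, ih]

-- B's seen-accumulation is PySem.Set.ofList (first occurrences, in order)
theorem seen_eq_ofList (y : List Int) :
    y.foldl (fun (s : List Int) label => if label ∈ s then s else s ++ [label]) []
      = PySem.Set.ofList y := by
  have h : (fun (s : List Int) label => if label ∈ s then s else s ++ [label])
      = PySem.Set.add := by
    funext s a
    by_cases h : a ∈ s <;> simp [PySem.Set.add, PySem.Set.contains, h]
  rw [h, PySem.Set.ofList_eq_foldl]

-- ===== VERDICT (by name: the statement is the Claim_ definition above) =====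
theorem pred_dict_spec : Claim_equal_pred_dict := by
  intro pred y _ hpre
  simp only [Spec_pred_dict, pred_dict, pred_dict_alt]
  rw [foldA_index_zip _ y pred PySem.Dict.empty hpre, seen_eq_ofList]
  have hfst : (y.zip pred).map Prod.fst = y := List.map_fst_zip hpre
  have hemp : ∀ j v, (PySem.Dict.empty : PySem.Dict Int (List Int)).get? j = some v →
      ∃ c t : Int, v = [c, t] := by
    intro j v hj
    rw [PySem.Dict.get?_empty] at hj
    exact absurd hj (by simp)
  have hfun : (fun (d : PySem.Dict Int (List Int)) (p : Int × Int) => predStepA d p.1 p.2)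
      = (fun d p => d.insert p.1 ((fun (d : PySem.Dict Int (List Int)) (p : Int × Int) => predValA d p.1 p.2) d p)) := by
    funext d p
    exact predStepA_insert d p.1 p.2
  -- keys of A's dict: first occurrences of y, in order
  have hkeys : ((y.zip pred).foldl (fun d p => predStepA d p.1 p.2) PySem.Dict.empty).keys
      = PySem.Set.ofList y := by
    rw [hfun, PySem.Dict.keys_foldl_insert_key, PySem.Dict.keys_empty, hfst,
      PySem.Set.update_nil_left]
  have hnodup : ((y.zip pred).foldl (fun d p => predStepA d p.1 p.2) PySem.Dict.empty).keys.Nodup := by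
    rw [hfun]
    exact PySem.Dict.nodup_keys_foldl_insert_key _ _ _ _ (by simp [PySem.Dict.keys_empty])
  -- items of A's dict via its keys and lookups
  rw [PySem.Dict.items_eq_map_keys _ hnodup [], hkeys]
  refine List.map_congr_left ?_
  intro k hk
  have hky : k ∈ y := ((PySem.Set.mem_ofList y) k).mp hk
  have hA := A_loop_get? (y.zip pred) PySem.Dict.empty hemp k
  rw [PySem.Dict.get?_empty, hfst] at hA
  simp only [if_pos hky] at hA
  have hgd : ((y.zip pred).foldl (fun d p => predStepA d p.1 p.2) PySem.Dict.empty).getD k []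
      = [(y.count k : Int), ((matchedLabels (y.zip pred)).count k : Int)] :=
    PySem.Dict.getD_of_get?_eq_some _ [] hA
  have hB := B_corr_fold k (y.zip pred) 0
  rw [zero_add] at hB
  simp only [hgd, hB]
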